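-- pv_equiv track=rewrite | github.com/code-study-classes/python-basics-Mikhail-Makharia-1105o | practice_package/strings.py | count_vowel_groups
-- ===== SOURCE A (Python) =====
-- def count_vowel_groups(word):
--     vowels = {'a', 'e', 'i', 'o', 'u', 'y'}
--     count = 0
--     in_group = False
--     for char in word.lower():
--         if char in vowels:
--             if not in_group:
--                 count += 1
--                 in_group = True
--         else:
--             in_group = False
--     return count
-- ===== SOURCE B (Python) =====
-- import re
--
-- def count_vowel_groups(word):
--     return len(re.findall(r'[aeiouy]+', word.lower()))
-- ===== Notes on version B (the rewrite author's own statement) =====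
-- stated objective: idiomatic
-- what changed: Replaces the explicit scan with an in_group flag by a single regex findall of maximal vowel runs [aeiouy]+ on the lowercased word, returning the number of matches.
import Mathlib
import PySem

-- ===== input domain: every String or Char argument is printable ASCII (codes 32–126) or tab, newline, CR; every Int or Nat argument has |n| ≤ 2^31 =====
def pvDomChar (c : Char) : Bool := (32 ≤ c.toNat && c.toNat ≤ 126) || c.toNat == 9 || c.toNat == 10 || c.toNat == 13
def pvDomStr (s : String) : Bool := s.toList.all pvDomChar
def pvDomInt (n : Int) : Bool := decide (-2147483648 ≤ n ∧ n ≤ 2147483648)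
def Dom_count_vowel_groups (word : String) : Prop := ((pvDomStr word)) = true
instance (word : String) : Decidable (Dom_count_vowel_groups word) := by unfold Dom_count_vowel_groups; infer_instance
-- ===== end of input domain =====

-- B replaces A's explicit in_group-flag scan by counting the maximal vowel runs that
-- re.findall(r'[aeiouy]+', …) yields (objective: idiomatic; same O(n) cost).

-- ===== PORT A =====
-- the for-loop of A: state (count, in_group), branches in A's order
def cvgLoop (vowels : PySem.Set Char) : List Char → Int → Bool → Int
  | [], count, _ => count
  | c :: rest, count, in_group =>
    if PySem.Set.contains vowels c then
      if !in_group then cvgLoop vowels rest (count + 1) true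
      else cvgLoop vowels rest count true
    else cvgLoop vowels rest count false

def count_vowel_groups (word : String) : Int :=
  let vowels : PySem.Set Char := PySem.Set.ofList ['a', 'e', 'i', 'o', 'u', 'y']
  cvgLoop vowels (PySem.Str.lower word).toList 0 false

-- ===== PORT B =====
-- the regex character class [aeiouy]
def isVowelB (c : Char) : Bool := c = 'a' || c = 'e' || c = 'i' || c = 'o' || c = 'u' || c = 'y'

-- len(re.findall(r'[aeiouy]+', s)): the regex engine finds the next vowel, consumes the
-- whole maximal run as one match, and resumes after it — exact for this pattern.
def findallRuns : List Char → Int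
  | [] => 0
  | c :: rest =>
    if isVowelB c then 1 + findallRuns (rest.dropWhile isVowelB)
    else findallRuns rest
termination_by l => l.length
decreasing_by
  · exact Nat.lt_succ_of_le (List.length_dropWhile_le isVowelB rest)
  · exact Nat.lt_succ_self _

def count_vowel_groups_alt (word : String) : Int :=
  findallRuns (PySem.Str.lower word).toList

-- ===== PRECONDITION & SPEC =====
def Spec_count_vowel_groups (word : String) (out : Int) : Prop := out = count_vowel_groups_alt word
instance (word : String) (out : Int) : Decidable (Spec_count_vowel_groups word out) := by unfold Spec_count_vowel_groups; infer_instance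

-- ===== CLAIM (what is proved, stated in full; the proofs are below) =====
def Claim_equal_count_vowel_groups : Prop := ∀ (word : String), Dom_count_vowel_groups word → Spec_count_vowel_groups word (count_vowel_groups word)

-- ===== LEMMAS AND PROOFS =====

-- loop invariant: with the flag down the loop adds the number of runs ahead; with the
-- flag up it adds the number of runs after the current run
theorem cvgLoop_eq (l : List Char) :
    (∀ count : Int, cvgLoop (PySem.Set.ofList ['a', 'e', 'i', 'o', 'u', 'y']) l count false
        = count + findallRuns l) ∧
    (∀ count : Int, cvgLoop (PySem.Set.ofList ['a', 'e', 'i', 'o', 'u', 'y']) l count true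
        = count + findallRuns (l.dropWhile isVowelB)) := by
  induction hl : l.length using Nat.strong_induction_on generalizing l with
  | _ n ih =>
    subst hl
    match l with
    | [] => simp [cvgLoop, findallRuns]
    | c :: rest =>
      have hr := ih rest.length (by simp) rest rfl
      by_cases hv : isVowelB c = true
      · have hv0 := hv; simp [isVowelB] at hv0
        have hv' : c = 'a' ∨ c = 'e' ∨ c = 'i' ∨ c = 'o' ∨ c = 'u' ∨ c = 'y' := by tauto
        constructor <;> intro count <;>
          simp [cvgLoop, hv, hv', findallRuns, List.dropWhile, hr.2] <;> try omega
      · have hv0 := hv; simp [isVowelB] at hv0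
        have hv' : ¬(c = 'a' ∨ c = 'e' ∨ c = 'i' ∨ c = 'o' ∨ c = 'u' ∨ c = 'y') := by tauto
        constructor <;> intro count <;>
          simp [cvgLoop, hv, hv', findallRuns, List.dropWhile, hr.1]

-- ===== VERDICT (by name: the statement is the Claim_ definition above) =====
theorem count_vowel_groups_spec : Claim_equal_count_vowel_groups := by
  intro word _
  unfold Spec_count_vowel_groups count_vowel_groups count_vowel_groups_alt
  simpa using (cvgLoop_eq (PySem.Str.lower word).toList).1 0
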